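-- pv_equiv track=rewrite | github.com/dalibo/ldap2pg | ldap2pg/utils.py | make_group_map
-- ===== SOURCE A (Python) =====
-- def list_descendant(groups, name):
--     # Returns the recursive list of all descendant of name in hierarchy
--     # `groups`. `groups` is a flat dict of `groups`
--     for child in groups[name]:
--         if child in groups:
--             for grandchild in list_descendant(groups, child):
--                 yield grandchild
--         else:
--             yield child
--
-- def make_group_map(values, groups=None):
--     # Resolve `groups` including other `groups`, and ungrouped values in a
--     # single dict mapping either value name or group name to a list of
--     # effective values name.
--
--     groups = groups or {}
--
--     # First, add simple map for value -> value
--     aliases = dict((k, [k]) for k in values)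
--     # Now resolve groups descendant to value list and update map.
--     aliases.update(dict(
--         (k, sorted(set(list_descendant(groups, k))))
--         for k in groups
--     ))
--     return aliases
-- ===== SOURCE B (Python) =====
-- def make_group_map(values, groups=None):
--     # Bottom-up fixed-point DP: Jacobi sweeps over the group map compute every
--     # group's descendant leaf set at once, stopping at the fixpoint; no recursion.
--     groups = groups or {}
--     desc = {k: set() for k in groups}
--     for _ in range(len(groups)):
--         new = {}
--         for k, children in groups.items():
--             s = set()
--             for c in children:
--                 if c in groups:
--                     s |= desc[c]
--                 else:
--                     s.add(c)
--             new[k] = s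
--         if new == desc:
--             break
--         desc = new
--     result = {v: [v] for v in values}
--     for k in groups:
--         result[k] = sorted(desc[k])
--     return result
-- ===== Notes on version B (the rewrite author's own statement) =====
-- stated objective: alternative
-- what changed: Replaces the per-root recursive generator over the group hierarchy with len(groups) bottom-up Jacobi sweeps over a table that compute all groups' descendant leaf sets simultaneously, with no recursion.
import Mathlib
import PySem

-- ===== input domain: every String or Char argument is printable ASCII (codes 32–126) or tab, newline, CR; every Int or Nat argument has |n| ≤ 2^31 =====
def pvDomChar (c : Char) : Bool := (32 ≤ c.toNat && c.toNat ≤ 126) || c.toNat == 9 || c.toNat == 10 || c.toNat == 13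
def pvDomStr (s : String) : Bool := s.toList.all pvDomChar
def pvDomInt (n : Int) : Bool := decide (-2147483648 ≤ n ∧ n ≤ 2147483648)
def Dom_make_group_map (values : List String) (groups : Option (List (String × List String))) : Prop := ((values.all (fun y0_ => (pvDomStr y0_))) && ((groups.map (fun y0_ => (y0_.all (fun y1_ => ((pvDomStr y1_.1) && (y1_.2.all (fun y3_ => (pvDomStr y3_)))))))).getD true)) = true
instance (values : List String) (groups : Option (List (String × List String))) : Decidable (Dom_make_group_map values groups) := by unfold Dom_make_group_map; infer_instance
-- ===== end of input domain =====

-- Alternative algorithm: B replaces A's per-root recursive descendant enumeration by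
-- len(groups) bottom-up sweeps that compute all groups' descendant sets at once.

-- ===== PORT A =====
-- Python's generator recursion is unbounded; the recursion only ever steps from a group key to
-- a group key, so on acyclic inputs (Pre_) its depth is ≤ the number of groups and the fuel
-- gs.size is never observed.  groups[name] is only evaluated with name a key of groups, where
-- getD name [] is exact.
def list_descendant (gs : PySem.Dict String (List String)) (name : String) : Nat → List String
  | 0 => []
  | f+1 => (gs.getD name []).flatMap (fun child =>
      if gs.contains child then list_descendant gs child f else [child])

def make_group_map (values : List String) (groups : Option (List (String × List String))) : List (String × List String) :=
  let gs := PySem.Dict.ofList (groups.getD [])      -- groups = groups or {}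
  -- aliases = dict((k, [k]) for k in values)
  let aliases := values.foldl (fun d k => d.insert k [k]) PySem.Dict.empty
  -- aliases.update(dict((k, sorted(set(list_descendant(groups, k)))) for k in groups))
  let aliases := gs.keys.foldl (fun d k =>
      d.insert k (PySem.List.sorted (PySem.Set.ofList (list_descendant gs k gs.size)) (fun x => x) false)) aliases
  aliases.items

-- ===== PORT B =====
-- s = set(); for c in children: s |= desc[c] if c in groups else s.add(c)
def mgmSweepKey (gs : PySem.Dict String (List String)) (desc : PySem.Dict String (PySem.Set String)) (children : List String) : PySem.Set String :=
  children.foldl (fun s c =>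
      if gs.contains c then PySem.Set.union s (desc.getD c PySem.Set.empty)
      else PySem.Set.add s c) PySem.Set.empty

-- one sweep: new = {k: sweepKey(children) for k, children in groups.items()}
def mgmSweep (gs : PySem.Dict String (List String)) (desc : PySem.Dict String (PySem.Set String)) : PySem.Dict String (PySem.Set String) :=
  gs.items.foldl (fun nw kv => nw.insert kv.1 (mgmSweepKey gs desc kv.2)) PySem.Dict.empty

-- Python's 'new == desc' on dicts of sets: keys compared as a set, values compared as sets
-- (hand-ported, exact: dict == ignores key order; both values are Python sets)
def mgmDictEq (a b : PySem.Dict String (PySem.Set String)) : Bool :=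
  PySem.Set.equal (PySem.Set.ofList a.keys) (PySem.Set.ofList b.keys) &&
  a.keys.all (fun k => PySem.Set.equal (a.getD k PySem.Set.empty) (b.getD k PySem.Set.empty))

-- one loop iteration; the Bool records that 'break' has run (loop exited at the fixpoint)
def mgmStep (gs : PySem.Dict String (List String))
    (st : PySem.Dict String (PySem.Set String) × Bool) : PySem.Dict String (PySem.Set String) × Bool :=
  if st.2 then st
  else
    let nw := mgmSweep gs st.1
    if mgmDictEq nw st.1 then (st.1, true) else (nw, false)

def make_group_map_alt (values : List String) (groups : Option (List (String × List String))) : List (String × List String) :=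
  let gs := PySem.Dict.ofList (groups.getD [])      -- groups = groups or {}
  -- desc = {k: set() for k in groups}
  -- for _ in range(len(groups)): new = sweep(desc); if new == desc: break; desc = new
  let desc := ((List.range gs.size).foldl (fun st _ => mgmStep gs st)
      (gs.keys.foldl (fun d k => d.insert k PySem.Set.empty) PySem.Dict.empty, false)).1
  -- result = {v: [v] for v in values}
  let result := values.foldl (fun d k => d.insert k [k]) PySem.Dict.empty
  -- for k in groups: result[k] = sorted(desc[k])
  let result := gs.keys.foldl (fun d k =>
      d.insert k (PySem.List.sorted (desc.getD k PySem.Set.empty) (fun x => x) false)) result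
  result.items

-- ===== PRECONDITION & SPEC =====
-- iterated peeling: a group key survives while it still has an edge into surviving keys
def mgmPeel (gs : PySem.Dict String (List String)) (remaining : List String) : List String :=
  remaining.filter (fun k => (gs.getD k []).any (fun c => remaining.contains c))

-- Pre_ excludes exactly the inputs whose group graph has a cycle (some key left after
-- size-many peels): there Python A's generator recurses forever (RecursionError).
def Pre_make_group_map (values : List String) (groups : Option (List (String × List String))) : Prop :=
  (mgmPeel (PySem.Dict.ofList (groups.getD [])))^[(PySem.Dict.ofList (groups.getD [])).size]
      (PySem.Dict.ofList (groups.getD [])).keys = []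
instance (values : List String) (groups : Option (List (String × List String))) : Decidable (Pre_make_group_map values groups) := by unfold Pre_make_group_map; infer_instance

def pvWitness_make_group_map : List String × (Option (List (String × List String))) :=
  (["a", "b"], some [("g", ["a", "h", "c"]), ("h", ["b"])])

def Spec_make_group_map (values : List String) (groups : Option (List (String × List String))) (out : List (String × List String)) : Prop := out = make_group_map_alt values groups
instance (values : List String) (groups : Option (List (String × List String))) (out : List (String × List String)) : Decidable (Spec_make_group_map values groups out) := by unfold Spec_make_group_map; infer_instance

-- ===== CLAIM (what is proved, stated in full; the proofs are below) =====
def Claim_equal_make_group_map : Prop := ∀ (values : List String) (groups : Option (List (String × List String))), Dom_make_group_map values groups → Pre_make_group_map values groups → Spec_make_group_map values groups (make_group_map values groups)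

-- ===== LEMMAS AND PROOFS =====

-- the initial table maps everything to the empty set
theorem mgm_getD_init (ks : List String) (d : PySem.Dict String (PySem.Set String))
    (h : ∀ k', d.getD k' PySem.Set.empty = PySem.Set.empty) (k : String) :
    (ks.foldl (fun d k => d.insert k PySem.Set.empty) d).getD k PySem.Set.empty = PySem.Set.empty := by
  induction ks generalizing d with
  | nil => exact h k
  | cons x xs ih =>
      refine ih _ (fun k' => ?_)
      rw [PySem.Dict.getD_insert]
      split
      · rfl
      · exact h k'

-- lookup in the table produced by one sweep
theorem mgm_get?_sweep (gs : PySem.Dict String (List String)) (d : PySem.Dict String (PySem.Set String))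
    (hnd : gs.keys.Nodup) (k : String) :
    (mgmSweep gs d).get? k = (gs.get? k).map (fun ch => mgmSweepKey gs d ch) := by
  have hfresh : ∀ kv ∈ gs.items, (PySem.Dict.empty : PySem.Dict String (PySem.Set String)).contains kv.1 = false := by
    intro kv _; simp [PySem.Dict.contains_empty]
  have hnd' : (gs.items.map (fun kv => kv.1)).Nodup := hnd
  have hitems : (mgmSweep gs d).items
      = PySem.Dict.empty.items ++ gs.items.map (fun kv => (kv.1, mgmSweepKey gs d kv.2)) :=
    PySem.Dict.items_foldl_insert_fresh gs.items (fun kv => kv.1) (fun kv => mgmSweepKey gs d kv.2)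
      PySem.Dict.empty hfresh hnd'
  have hkeys : (mgmSweep gs d).keys = gs.keys := by
    simp only [PySem.Dict.keys, hitems]
    simp [PySem.Dict.empty, Function.comp]
  cases hgk : gs.get? k with
  | none =>
      show (mgmSweep gs d).get? k = none
      rw [PySem.Dict.get?_eq_none_iff_not_mem_keys] at hgk ⊢
      rwa [hkeys]
  | some ch =>
      show (mgmSweep gs d).get? k = some (mgmSweepKey gs d ch)
      have hmem : (k, ch) ∈ gs.items := PySem.Dict.mem_items_of_get?_eq_some gs hgk
      have hmem' : (k, mgmSweepKey gs d ch) ∈ (mgmSweep gs d).items := by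
        rw [hitems]
        refine List.mem_append_right _ ?_
        exact List.mem_map_of_mem hmem
      exact PySem.Dict.get?_of_mem_items _ hmem' (by rw [hkeys]; exact hnd)

-- membership in one sweep-key accumulation
theorem mgm_mem_sweepKey (gs : PySem.Dict String (List String)) (d : PySem.Dict String (PySem.Set String))
    (children : List String) (x : String) :
    x ∈ mgmSweepKey gs d children ↔
      ∃ c ∈ children, if gs.contains c then x ∈ d.getD c PySem.Set.empty else x = c := by
  have aux : ∀ (cs : List String) (s : PySem.Set String),
      x ∈ cs.foldl (fun s c => if gs.contains c then PySem.Set.union s (d.getD c PySem.Set.empty)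
          else PySem.Set.add s c) s ↔
      (x ∈ s ∨ ∃ c ∈ cs, if gs.contains c then x ∈ d.getD c PySem.Set.empty else x = c) := by
    intro cs
    induction cs with
    | nil => simp
    | cons c cs ih =>
        intro s
        rw [List.foldl_cons, ih]
        cases hc : gs.contains c <;>
          simp only [Bool.false_eq_true, if_true, if_false, PySem.Set.mem_union,
            PySem.Set.mem_add, List.mem_cons] <;>
        · constructor
          · rintro ((hs | hd) | ⟨c', hc', hp⟩)
            · exact Or.inl hs
            · exact Or.inr ⟨c, Or.inl rfl, by simp [hc, Bool.false_eq_true]; exact hd⟩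
            · exact Or.inr ⟨c', Or.inr hc', hp⟩
          · rintro (hs | ⟨c', (rfl | hc'), hp⟩)
            · exact Or.inl (Or.inl hs)
            · exact Or.inl (Or.inr (by simpa [hc, Bool.false_eq_true] using hp))
            · exact Or.inr ⟨c', hc', hp⟩
  unfold mgmSweepKey
  rw [aux]
  simp

theorem mgm_nodup_sweepKey (gs : PySem.Dict String (List String)) (d : PySem.Dict String (PySem.Set String))
    (children : List String) : (mgmSweepKey gs d children).Nodup := by
  have aux : ∀ (cs : List String) (s : PySem.Set String), s.Nodup →
      (cs.foldl (fun s c => if gs.contains c then PySem.Set.union s (d.getD c PySem.Set.empty)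
          else PySem.Set.add s c) s).Nodup := by
    intro cs
    induction cs with
    | nil => intro s hs; simpa using hs
    | cons c cs ih =>
        intro s hs
        simp only [List.foldl_cons]
        refine ih _ ?_
        cases hc : gs.contains c
        · simp only [Bool.false_eq_true, if_false]; exact PySem.Set.nodup_add _ _ hs
        · simp only [if_true]; exact PySem.Set.nodup_union _ _ hs
  exact aux children PySem.Set.empty (by simp [PySem.Set.empty])

-- the table after i sweeps
def mgmDescAfter (gs : PySem.Dict String (List String)) (i : Nat) : PySem.Dict String (PySem.Set String) :=
  (List.range i).foldl (fun d _ => mgmSweep gs d)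
    (gs.keys.foldl (fun d k => d.insert k PySem.Set.empty) PySem.Dict.empty)

theorem mgmDescAfter_succ (gs : PySem.Dict String (List String)) (i : Nat) :
    mgmDescAfter gs (i + 1) = mgmSweep gs (mgmDescAfter gs i) := by
  unfold mgmDescAfter
  rw [List.range_succ, List.foldl_append]
  rfl

theorem mgmDescAfter_zero_getD (gs : PySem.Dict String (List String)) (k : String) :
    (mgmDescAfter gs 0).getD k PySem.Set.empty = PySem.Set.empty := by
  unfold mgmDescAfter
  simp only [List.range_zero, List.foldl_nil]
  exact mgm_getD_init gs.keys PySem.Dict.empty (fun k' => PySem.Dict.getD_empty k' _) k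

-- after i sweeps a key's entry holds exactly the elements A's generator reaches with fuel i
theorem mgm_invariant (gs : PySem.Dict String (List String)) (hnd : gs.keys.Nodup) :
    ∀ (i : Nat) (k : String), k ∈ gs.keys → ∀ (x : String),
      (x ∈ (mgmDescAfter gs i).getD k PySem.Set.empty ↔ x ∈ list_descendant gs k i) := by
  intro i
  induction i with
  | zero =>
      intro k _ x
      rw [mgmDescAfter_zero_getD]
      simp [list_descendant, PySem.Set.empty]
  | succ i ih =>
      intro k hk x
      have hcont : gs.contains k = true := Iff.mpr (PySem.Dict.contains_iff_mem_keys _ _) hk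
      obtain ⟨ch, hgk⟩ : ∃ ch, gs.get? k = some ch := by
        rw [PySem.Dict.contains_eq_isSome_get?] at hcont
        exact Option.isSome_iff_exists.mp hcont
      have hgetD : (mgmDescAfter gs (i + 1)).getD k PySem.Set.empty
          = mgmSweepKey gs (mgmDescAfter gs i) ch := by
        rw [mgmDescAfter_succ, PySem.Dict.getD_eq_get?_getD, mgm_get?_sweep gs _ hnd, hgk]
        rfl
      have hch : gs.getD k [] = ch := by
        rw [PySem.Dict.getD_eq_get?_getD, hgk]
        rfl
      rw [hgetD, mgm_mem_sweepKey]
      show _ ↔ x ∈ (gs.getD k []).flatMap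
        (fun child => if gs.contains child then list_descendant gs child i else [child])
      rw [hch, List.mem_flatMap]
      constructor
      · rintro ⟨c, hc, hp⟩
        refine ⟨c, hc, ?_⟩
        cases hcc : gs.contains c
        · simp only [Bool.false_eq_true, if_false, List.mem_singleton]
          simpa [hcc, Bool.false_eq_true] using hp
        · simp only [if_true]
          have hck : c ∈ gs.keys := Iff.mp (PySem.Dict.contains_iff_mem_keys _ _) hcc
          exact (ih c hck x).mp (by simpa [hcc] using hp)
      · rintro ⟨c, hc, hp⟩
        refine ⟨c, hc, ?_⟩
        cases hcc : gs.contains c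
        · simp only [Bool.false_eq_true, if_false]
          simpa [hcc, Bool.false_eq_true, List.mem_singleton] using hp
        · simp only [if_true]
          have hck : c ∈ gs.keys := Iff.mp (PySem.Dict.contains_iff_mem_keys _ _) hcc
          exact (ih c hck x).mpr (by simpa [hcc] using hp)

-- the keys after one sweep are exactly the group keys
theorem mgm_keys_sweep (gs : PySem.Dict String (List String)) (d : PySem.Dict String (PySem.Set String))
    (hnd : gs.keys.Nodup) : (mgmSweep gs d).keys = gs.keys := by
  have hfresh : ∀ kv ∈ gs.items, (PySem.Dict.empty : PySem.Dict String (PySem.Set String)).contains kv.1 = false := by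
    intro kv _; simp [PySem.Dict.contains_empty]
  have hitems : (mgmSweep gs d).items
      = PySem.Dict.empty.items ++ gs.items.map (fun kv => (kv.1, mgmSweepKey gs d kv.2)) :=
    PySem.Dict.items_foldl_insert_fresh gs.items (fun kv => kv.1) (fun kv => mgmSweepKey gs d kv.2)
      PySem.Dict.empty hfresh hnd
  simp only [PySem.Dict.keys, hitems]
  simp [PySem.Dict.empty, Function.comp]

theorem mgm_nodup_sweep_getD (gs : PySem.Dict String (List String)) (hnd : gs.keys.Nodup)
    (d : PySem.Dict String (PySem.Set String)) (k : String) :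
    ((mgmSweep gs d).getD k PySem.Set.empty).Nodup := by
  rw [PySem.Dict.getD_eq_get?_getD, mgm_get?_sweep gs _ hnd]
  cases gs.get? k with
  | none => simp [PySem.Set.empty]
  | some ch => exact mgm_nodup_sweepKey gs _ ch

-- two tables agreeing (as sets) on every group key
def mgmRel (gs : PySem.Dict String (List String))
    (d d' : PySem.Dict String (PySem.Set String)) : Prop :=
  ∀ k ∈ gs.keys, ∀ x, x ∈ d.getD k PySem.Set.empty ↔ x ∈ d'.getD k PySem.Set.empty

theorem mgm_sweepKey_congr (gs : PySem.Dict String (List String))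
    (d d' : PySem.Dict String (PySem.Set String)) (h : mgmRel gs d d') (ch : List String) (x : String) :
    x ∈ mgmSweepKey gs d ch ↔ x ∈ mgmSweepKey gs d' ch := by
  rw [mgm_mem_sweepKey, mgm_mem_sweepKey]
  refine exists_congr fun c => and_congr_right fun _ => ?_
  cases hcc : gs.contains c
  · simp
  · simp only [if_true]
    exact h c (Iff.mp (PySem.Dict.contains_iff_mem_keys _ _) hcc) x

theorem mgm_sweep_congr (gs : PySem.Dict String (List String)) (hnd : gs.keys.Nodup)
    (d d' : PySem.Dict String (PySem.Set String)) (h : mgmRel gs d d') :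
    mgmRel gs (mgmSweep gs d) (mgmSweep gs d') := by
  intro k hk x
  have hcont : gs.contains k = true := Iff.mpr (PySem.Dict.contains_iff_mem_keys _ _) hk
  obtain ⟨ch, hgk⟩ : ∃ ch, gs.get? k = some ch := by
    rw [PySem.Dict.contains_eq_isSome_get?] at hcont
    exact Option.isSome_iff_exists.mp hcont
  rw [PySem.Dict.getD_eq_get?_getD, PySem.Dict.getD_eq_get?_getD,
    mgm_get?_sweep gs _ hnd, mgm_get?_sweep gs _ hnd, hgk]
  exact mgm_sweepKey_congr gs d d' h ch x

theorem mgm_dictEq_rel (gs : PySem.Dict String (List String)) (hnd : gs.keys.Nodup)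
    (d : PySem.Dict String (PySem.Set String)) (h : mgmDictEq (mgmSweep gs d) d = true) :
    mgmRel gs (mgmSweep gs d) d := by
  intro k hk x
  unfold mgmDictEq at h
  rw [Bool.and_eq_true] at h
  have hall := List.all_eq_true.mp h.2 k (by rwa [mgm_keys_sweep gs d hnd])
  exact (PySem.Set.equal_iff _ _ |>.mp hall) x

-- the fixpoint loop with break agrees (as sets, on every group key) with i plain sweeps
theorem mgm_state_inv (gs : PySem.Dict String (List String)) (hnd : gs.keys.Nodup) (i : Nat) :
    mgmRel gs ((List.range i).foldl (fun st _ => mgmStep gs st)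
        (gs.keys.foldl (fun d k => d.insert k PySem.Set.empty) PySem.Dict.empty, false)).1
      (mgmDescAfter gs i) ∧
    (((List.range i).foldl (fun st _ => mgmStep gs st)
        (gs.keys.foldl (fun d k => d.insert k PySem.Set.empty) PySem.Dict.empty, false)).2 = true →
      mgmRel gs (mgmSweep gs ((List.range i).foldl (fun st _ => mgmStep gs st)
        (gs.keys.foldl (fun d k => d.insert k PySem.Set.empty) PySem.Dict.empty, false)).1)
        ((List.range i).foldl (fun st _ => mgmStep gs st)
        (gs.keys.foldl (fun d k => d.insert k PySem.Set.empty) PySem.Dict.empty, false)).1) ∧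
    (∀ k, (((List.range i).foldl (fun st _ => mgmStep gs st)
        (gs.keys.foldl (fun d k => d.insert k PySem.Set.empty) PySem.Dict.empty, false)).1.getD
          k PySem.Set.empty).Nodup) := by
  induction i with
  | zero =>
      refine ⟨fun k _ x => Iff.rfl, by simp [List.range_zero, List.foldl_nil], fun k => ?_⟩
      simp only [List.range_zero, List.foldl_nil]
      rw [mgm_getD_init gs.keys PySem.Dict.empty (fun k' => PySem.Dict.getD_empty k' _) k]
      simp [PySem.Set.empty]
  | succ i ih =>
      obtain ⟨ihR, ihB, ihN⟩ := ih
      rw [List.range_succ, List.foldl_append, List.foldl_cons, List.foldl_nil] at *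
      rw [mgmDescAfter_succ]
      set st := (List.range i).foldl (fun st _ => mgmStep gs st)
        (gs.keys.foldl (fun d k => d.insert k PySem.Set.empty) PySem.Dict.empty, false) with hst
      unfold mgmStep
      cases hb : st.2
      · simp only [Bool.false_eq_true, if_false]
        cases hEq : mgmDictEq (mgmSweep gs st.1) st.1
        · simp only [Bool.false_eq_true, if_false]
          exact ⟨mgm_sweep_congr gs hnd _ _ ihR, by simp,
            fun k => mgm_nodup_sweep_getD gs hnd st.1 k⟩
        · simp only [if_true]
          have hrel := mgm_dictEq_rel gs hnd st.1 hEq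
          refine ⟨?_, fun _ => hrel, fun k => ihN k⟩
          intro k hk x
          exact Iff.trans (Iff.symm (hrel k hk x))
            (mgm_sweep_congr gs hnd _ _ ihR k hk x)
      · simp only [if_true]
        have hrel := ihB hb
        refine ⟨?_, fun _ => hrel, fun k => ihN k⟩
        intro k hk x
        exact Iff.trans (Iff.symm (hrel k hk x))
          (mgm_sweep_congr gs hnd _ _ ihR k hk x)

-- per key, A's sorted deduplicated descendant list equals B's sorted table entry
theorem mgm_key_eq (gs : PySem.Dict String (List String)) (hnd : gs.keys.Nodup)
    (k : String) (hk : k ∈ gs.keys) :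
    PySem.List.sorted (PySem.Set.ofList (list_descendant gs k gs.size)) (fun x => x) false
      = PySem.List.sorted (((List.range gs.size).foldl (fun st _ => mgmStep gs st)
          (gs.keys.foldl (fun d k => d.insert k PySem.Set.empty) PySem.Dict.empty, false)).1.getD
            k PySem.Set.empty) (fun x => x) false := by
  obtain ⟨hR, _, hN⟩ := mgm_state_inv gs hnd gs.size
  apply PySem.List.sorted_eq_sorted_of_perm
  · exact fun a b h => h
  · rw [List.perm_ext_iff_of_nodup (PySem.Set.nodup_ofList _) (hN k)]
    intro a
    rw [PySem.Set.mem_ofList, ← mgm_invariant gs hnd gs.size k hk a, hR k hk a]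

-- ===== VERDICT (by name: the statement is the Claim_ definition above) =====
theorem make_group_map_spec : Claim_equal_make_group_map := by
  intro values groups _ _
  unfold Spec_make_group_map make_group_map make_group_map_alt
  dsimp only
  apply congrArg
  apply PySem.List.foldl_congr_mem'
  intro k hk acc
  have hnd : (PySem.Dict.ofList (groups.getD [])).keys.Nodup := PySem.Dict.nodup_keys_ofList _
  rw [mgm_key_eq _ hnd k hk]
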